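-- pv_equiv track=rewrite | github.com/liuyubiao/test_2 | category/util.py | get_info_by_keyWord
-- ===== SOURCE A (Python) =====
-- def get_info_by_keyWord(texts_list,keyWords):
--     result = "不分"
--     for text_list in texts_list:
--         for text in text_list:
--             for keyWord in keyWords:
--                 if keyWord in text:
--                     return text
--     return result
-- ===== SOURCE B (Python) =====
-- def get_info_by_keyWord(texts_list, keyWords):
--     flat = [t for tl in texts_list for t in tl]
--     if "" in keyWords:
--         # the empty keyword is a substring of every text
--         return flat[0] if flat else "不分"
--     # bucket the keywords once by their first character
--     index = {}
--     for k in keyWords: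
--         index.setdefault(k[0], []).append(k)
--     # one scan per text: at each position only try keywords whose
--     # first character matches, by an in-place prefix test
--     for text in flat:
--         for j in range(len(text)):
--             for k in index.get(text[j], []):
--                 if text.startswith(k, j):
--                     return text
--     return "不分"
-- ===== Notes on version B (the rewrite author's own statement) =====
-- stated objective: alternative
-- what changed: Replaces A's per-keyword substring tests inside three nested loops by a multi-pattern scan: the keywords are bucketed once into a dict keyed by first character, the texts are flattened once, and each text is scanned position by position trying only the keywords whose first character matches there (in-place startswith), with an empty-keyword short-circuit.
import Mathlib
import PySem

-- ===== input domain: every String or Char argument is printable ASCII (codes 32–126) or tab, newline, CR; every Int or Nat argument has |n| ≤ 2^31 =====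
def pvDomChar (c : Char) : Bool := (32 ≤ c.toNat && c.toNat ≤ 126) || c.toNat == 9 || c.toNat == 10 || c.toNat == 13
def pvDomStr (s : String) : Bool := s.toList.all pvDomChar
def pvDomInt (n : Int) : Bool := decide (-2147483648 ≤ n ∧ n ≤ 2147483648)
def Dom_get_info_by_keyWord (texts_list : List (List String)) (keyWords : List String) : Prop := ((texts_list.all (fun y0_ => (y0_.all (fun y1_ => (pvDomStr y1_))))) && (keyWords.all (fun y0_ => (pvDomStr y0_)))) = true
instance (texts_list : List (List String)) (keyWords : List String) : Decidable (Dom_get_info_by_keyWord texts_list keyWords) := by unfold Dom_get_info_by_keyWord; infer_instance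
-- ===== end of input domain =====

-- B buckets the keywords once by first character, then scans each text position-by-position trying only the matching bucket (multi-pattern scan), instead of A's per-keyword substring tests; objective: alternative.


-- ===== PORT A =====
-- innermost loop: 'for keyWord in keyWords: if keyWord in text: return text'
def pvA_kwLoop (keyWords : List String) (text : String) : Option String :=
  match keyWords with
  | [] => none
  | k :: rest => if PySem.Str.isIn k text then some text else pvA_kwLoop rest text

-- middle loop: 'for text in text_list: …'
def pvA_textLoop (text_list : List String) (keyWords : List String) : Option String :=
  match text_list with
  | [] => none
  | t :: rest =>
    match pvA_kwLoop keyWords t with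
    | some r => some r
    | none => pvA_textLoop rest keyWords

-- outer loop: 'for text_list in texts_list: …', falling through to result = "不分"
def pvA_outerLoop (texts_list : List (List String)) (keyWords : List String) : Option String :=
  match texts_list with
  | [] => none
  | tl :: rest =>
    match pvA_textLoop tl keyWords with
    | some r => some r
    | none => pvA_outerLoop rest keyWords

def get_info_by_keyWord (texts_list : List (List String)) (keyWords : List String) : String :=
  match pvA_outerLoop texts_list keyWords with
  | some r => r
  | none => "不分"

-- ===== PORT B =====
-- 'index = {}; for k in keyWords: index.setdefault(k[0], []).append(k)'
-- k[0] is k.toList.headD ' '; the headD default is never read: this dict is only built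
-- after the '"" in keyWords' branch returned, so every k here is nonempty (exact there)
def pvB_index (keyWords : List String) : PySem.Dict Char (List String) :=
  keyWords.foldl (fun d k => d.modify (k.toList.headD ' ') [] (· ++ [k])) PySem.Dict.empty

-- 'for j in range(len(text)): for k in index.get(text[j], []): if text.startswith(k, j): return text'
-- (text[j] with 0 ≤ j < len is t.toList[j]?; str.startswith(k, j) is a prefix test on List.drop j)
def pvB_scan (index : PySem.Dict Char (List String)) (t : String) : Bool :=
  (List.range t.toList.length).any (fun j =>
    match t.toList[j]? with
    | some c => (index.getD c []).any (fun k => PySem.Chars.startswith (t.toList.drop j) k.toList)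
    | none => false)

-- flat = flatten once; '"" in keyWords' short-circuit; then 'for text in flat: … return text' = find?
def get_info_by_keyWord_alt (texts_list : List (List String)) (keyWords : List String) : String :=
  let flat := texts_list.flatMap id
  if keyWords.contains "" then
    match flat with
    | [] => "不分"
    | t :: _ => t
  else
    match flat.find? (pvB_scan (pvB_index keyWords)) with
    | some t => t
    | none => "不分"

-- ===== PRECONDITION & SPEC =====
def Spec_get_info_by_keyWord (texts_list : List (List String)) (keyWords : List String) (out : String) : Prop := out = get_info_by_keyWord_alt texts_list keyWords
instance (texts_list : List (List String)) (keyWords : List String) (out : String) : Decidable (Spec_get_info_by_keyWord texts_list keyWords out) := by unfold Spec_get_info_by_keyWord; infer_instance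

-- ===== CLAIM (what is proved, stated in full; the proofs are below) =====
def Claim_equal_get_info_by_keyWord : Prop := ∀ (texts_list : List (List String)) (keyWords : List String), Dom_get_info_by_keyWord texts_list keyWords → Spec_get_info_by_keyWord texts_list keyWords (get_info_by_keyWord texts_list keyWords)

-- ===== LEMMAS AND PROOFS =====

-- the bucket at c holds exactly the keywords whose first character is c (fold invariant)
theorem pvB_index_getD_gen (l : List String) (d : PySem.Dict Char (List String)) (c : Char) :
    (l.foldl (fun d k => d.modify (k.toList.headD ' ') [] (· ++ [k])) d).getD c []
      = d.getD c [] ++ l.filter (fun k => k.toList.headD ' ' == c) := by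
  induction l generalizing d with
  | nil => simp
  | cons k rest ih =>
    rw [List.foldl_cons, ih, PySem.Dict.getD_modify, List.filter_cons]
    by_cases h : k.toList.headD ' ' = c
    · rw [if_pos h.symm, if_pos (beq_iff_eq.mpr h), List.append_assoc, List.singleton_append, h]
    · rw [if_neg (fun hc => h hc.symm), if_neg (fun hbt => h (beq_iff_eq.mp hbt))]

theorem pvB_index_getD (keyWords : List String) (c : Char) :
    (pvB_index keyWords).getD c [] = keyWords.filter (fun k => k.toList.headD ' ' == c) := by
  rw [pvB_index, pvB_index_getD_gen, PySem.Dict.getD_empty, List.nil_append]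

-- with no empty keyword, B's bucketed position scan decides 'some keyword occurs in t'
theorem pvB_scan_eq (keyWords : List String) (t : String)
    (hne : ∀ k ∈ keyWords, k ≠ "") :
    pvB_scan (pvB_index keyWords) t = keyWords.any (fun k => PySem.Str.isIn k t) := by
  rw [Bool.eq_iff_iff]
  constructor
  · intro h
    obtain ⟨j, _, hj⟩ := List.any_eq_true.mp h
    cases hc : t.toList[j]? with
    | none => rw [hc] at hj; simp at hj
    | some c =>
      rw [hc] at hj
      obtain ⟨k, hkmem, hp⟩ := List.any_eq_true.mp hj
      rw [pvB_index_getD, List.mem_filter] at hkmem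
      rw [PySem.Chars.startswith_iff] at hp
      refine List.any_eq_true.mpr ⟨k, hkmem.1, ?_⟩
      rw [PySem.Str.isIn_iff_infix]
      exact hp.isInfix.trans (List.drop_suffix j t.toList).isInfix
  · intro h
    obtain ⟨k, hk, hin⟩ := List.any_eq_true.mp h
    rw [PySem.Str.isIn_iff_infix] at hin
    obtain ⟨j, hp⟩ := (PySem.Chars.exists_prefix_drop_iff_isIn k.toList t.toList).mpr
      ((PySem.Chars.isIn_iff_infix k.toList t.toList).mpr hin)
    rcases hkl : k.toList with _ | ⟨c₀, rest⟩
    · exact absurd (String.toList_eq_nil_iff.mp hkl) (hne k hk)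
    · rw [hkl] at hp
      have hhead : t.toList[j]? = some c₀ := by
        rw [← List.head?_drop]
        cases hd : t.toList.drop j with
        | nil => rw [hd] at hp; exact absurd hp (by simp)
        | cons d ds =>
          rw [hd] at hp
          rw [List.head?_cons, (List.cons_prefix_cons.mp hp).1]
      have hj : j < t.toList.length :=
        List.getElem?_eq_some_iff.mp hhead |>.choose
      refine List.any_eq_true.mpr ⟨j, List.mem_range.mpr hj, ?_⟩
      rw [hhead]
      refine List.any_eq_true.mpr ⟨k, ?_, ?_⟩
      · rw [pvB_index_getD, List.mem_filter]
        exact ⟨hk, by rw [hkl]; simp⟩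
      · rw [PySem.Chars.startswith_iff, hkl]
        exact hp

-- A's keyword loop returns the text exactly when some keyword occurs in it
theorem pvA_kwLoop_eq (keyWords : List String) (text : String) :
    pvA_kwLoop keyWords text = if keyWords.any (fun k => PySem.Str.isIn k text) then some text else none := by
  induction keyWords with
  | nil => simp [pvA_kwLoop]
  | cons k rest ih =>
    rw [pvA_kwLoop, ih, List.any_cons]
    by_cases h : PySem.Str.isIn k text = true
    · rw [if_pos h, if_pos (by simp_all)]
    · rw [if_neg h]
      by_cases h2 : (rest.any fun k => PySem.Str.isIn k text) = true
      · rw [if_pos h2, if_pos (by simp_all)]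
      · rw [if_neg h2, if_neg (by simp_all)]

-- A's middle loop is find? over the text list
theorem pvA_textLoop_eq (text_list : List String) (keyWords : List String) :
    pvA_textLoop text_list keyWords = text_list.find? (fun t => keyWords.any (fun k => PySem.Str.isIn k t)) := by
  induction text_list with
  | nil => simp [pvA_textLoop]
  | cons t rest ih =>
    rw [pvA_textLoop, pvA_kwLoop_eq, ih]
    by_cases h : (keyWords.any fun k => PySem.Str.isIn k t) = true
    · rw [if_pos h, List.find?_cons, h]
    · rw [if_neg h, List.find?_cons, Bool.eq_false_iff.mpr h]

-- A's outer loop is find? over the flattened list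
theorem pvA_outerLoop_eq (texts_list : List (List String)) (keyWords : List String) :
    pvA_outerLoop texts_list keyWords = (texts_list.flatMap id).find? (fun t => keyWords.any (fun k => PySem.Str.isIn k t)) := by
  induction texts_list with
  | nil => simp [pvA_outerLoop]
  | cons tl rest ih =>
    simp only [pvA_outerLoop, pvA_textLoop_eq, ih, List.flatMap_cons, List.find?_append, id]
    cases tl.find? (fun t => keyWords.any (fun k => PySem.Str.isIn k t)) <;> simp

-- ===== VERDICT (by name: the statement is the Claim_ definition above) =====
theorem get_info_by_keyWord_spec : Claim_equal_get_info_by_keyWord := by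
  intro texts_list keyWords _
  unfold Spec_get_info_by_keyWord get_info_by_keyWord get_info_by_keyWord_alt
  rw [pvA_outerLoop_eq]
  by_cases hemp : keyWords.contains ""
  · rw [if_pos hemp]
    have hall : ∀ t, (keyWords.any (fun k => PySem.Str.isIn k t)) = true := by
      intro t
      refine List.any_eq_true.mpr ⟨"", List.contains_iff_mem.mp hemp, ?_⟩
      rw [PySem.Str.isIn_iff_infix]
      exact List.nil_infix
    cases hfl : texts_list.flatMap id with
    | nil => rfl
    | cons t rest => rw [List.find?_cons, hall t]
  · rw [if_neg hemp]
    have hne : ∀ k ∈ keyWords, k ≠ "" := by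
      intro k hk hEq
      exact hemp (List.contains_iff_mem.mpr (hEq ▸ hk))
    rw [funext (fun t => pvB_scan_eq keyWords t hne)]
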